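-- pv_equiv track=rewrite | github.com/Florian-Riesen-CH/Advent-of-code-2023 | Day 14/main.py | fall_rocks
-- ===== SOURCE A (Python) =====
-- def fall_rocks(line):
--     falling_line = list()
--     part_line = ''.join(line).split('#')
--     for part in part_line:
--         list_part = [i for i in part]
--         for i in range(len(list_part)):
--             if list_part[i] == 'O':
--                 for index in range(i,0,-1):
--                     if list_part[index-1] == 'O':
--                         break
--                     list_part[index-1] = 'O'
--                     list_part[index] = '.'
--         falling_line.extend(list_part)
--         falling_line.append('#')
--     del falling_line[-1]
--     return falling_line
-- ===== SOURCE B (Python) =====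
-- def fall_rocks(line):
--     out = []
--     for part in ''.join(line).split('#'):
--         k = 0       # number of 'O's seen in this part
--         cut = 0     # 1 + index of the last 'O' seen (0 if none)
--         pos = 0
--         for c in part:
--             pos += 1
--             if c == 'O':
--                 k += 1
--                 cut = pos
--         out.append('O' * k + '.' * (cut - k) + part[cut:])
--     return list('#'.join(out))
-- ===== Notes on version B (the rewrite author's own statement) =====
-- stated objective: alternative
-- what changed: A slides each rock character leftwards cell by cell within its hash-delimited segment (quadratic in segment length); B makes one counting pass per segment (number of rocks and the position after the last rock) and emits the rocks, the dots and the untouched tail of the segment in one step.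
import Mathlib
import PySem

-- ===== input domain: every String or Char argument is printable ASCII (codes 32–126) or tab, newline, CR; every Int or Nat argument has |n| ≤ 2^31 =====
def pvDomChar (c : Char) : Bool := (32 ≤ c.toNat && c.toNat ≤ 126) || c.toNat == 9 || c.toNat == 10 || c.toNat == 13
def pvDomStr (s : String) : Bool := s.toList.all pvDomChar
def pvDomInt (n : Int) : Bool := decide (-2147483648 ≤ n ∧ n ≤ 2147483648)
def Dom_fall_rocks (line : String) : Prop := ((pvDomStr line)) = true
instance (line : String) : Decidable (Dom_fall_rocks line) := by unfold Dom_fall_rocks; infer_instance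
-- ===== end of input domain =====

-- B replaces A's cell-by-cell leftward slide of every 'O' within each '#'-segment
-- by a single counting pass per segment that emits the segment in one step (objective: alternative).

-- ===== PORT A =====

-- inner loop: `for index in range(i,0,-1): if lst[index-1]=='O': break; lst[index-1]='O'; lst[index]='.'`
-- (indices are always in range when reached from the outer loop, so `getD` with default "" is exact)
def slideA (lst : List String) (index : Nat) : List String :=
  if 1 ≤ index then
    if lst.getD (index - 1) "" = "O" then lst
    else slideA ((lst.set (index - 1) "O").set index ".") (index - 1)
  else lst

-- outer loop: `for i in range(len(list_part)): if list_part[i] == 'O': <inner slide>`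
def loopA (lst : List String) (i : Nat) (n : Nat) : List String :=
  if _h : i < n then
    loopA (if lst.getD i "" = "O" then slideA lst i else lst) (i + 1) n
  else lst
termination_by n - i

def fall_rocks (line : String) : List String :=
  -- `''.join(line)` is the identity on a str argument; `.split('#')`
  let part_line := PySem.Chars.splitOn line.toList ['#']
  let falling_line := part_line.foldl (fun acc part =>
    -- `list_part = [i for i in part]` is the list of 1-character strings
    (acc ++ loopA (part.map (fun c => String.singleton c)) 0 part.length) ++ ["#"]) []
  -- `del falling_line[-1]` (the list always ends with "#": split returns ≥ 1 part)
  falling_line.dropLast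

-- ===== PORT B =====

-- per-character state (pos, k, cut): `pos += 1; if c == 'O': k += 1; cut = pos`
def foldB (cs : List Char) (st : Nat × Nat × Nat) : Nat × Nat × Nat :=
  cs.foldl (fun st c =>
    let pos := st.1 + 1
    if c = 'O' then (pos, st.2.1 + 1, pos) else (pos, st.2.1, st.2.2)) st

-- `'O' * k + '.' * (cut - k) + part[cut:]`
def partB (cs : List Char) : List Char :=
  let st := foldB cs (0, 0, 0)
  List.replicate st.2.1 'O' ++ List.replicate (st.2.2 - st.2.1) '.' ++ cs.drop st.2.2

def fall_rocks_alt (line : String) : List String :=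
  let parts := PySem.Chars.splitOn line.toList ['#']
  let out := parts.map partB
  -- `list('#'.join(out))`
  (PySem.Chars.join ['#'] out).map (fun c => String.singleton c)

-- ===== PRECONDITION & SPEC =====
def Spec_fall_rocks (line : String) (out : List String) : Prop := out = fall_rocks_alt line
instance (line : String) (out : List String) : Decidable (Spec_fall_rocks line out) := by unfold Spec_fall_rocks; infer_instance

-- ===== CLAIM (what is proved, stated in full; the proofs are below) =====
def Claim_equal_fall_rocks : Prop := ∀ (line : String), Dom_fall_rocks line → Spec_fall_rocks line (fall_rocks line)

-- ===== LEMMAS AND PROOFS =====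

theorem sing_eq_O_iff (c : Char) : String.singleton c = "O" ↔ c = 'O' := by
  constructor
  · intro h; have := congrArg String.toList h; simpa [String.singleton] using this
  · rintro rfl; rfl

theorem slideA_eq (mid : List String) (k : Nat) (d : List String)
    (hmid : ∀ x ∈ mid, x ≠ "O") :
    slideA (List.replicate k "O" ++ mid ++ "O" :: d) (k + mid.length)
      = List.replicate (k + 1) "O" ++ List.replicate mid.length "." ++ d := by
  induction mid using List.reverseRecOn generalizing d with
  | nil =>
      rw [slideA]
      rcases Nat.eq_zero_or_pos k with hk | hk
      · subst hk; simp
      · have h1 : 1 ≤ k + ([] : List String).length := by simp; omega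
        rw [if_pos h1]
        have hget : (List.replicate k "O" ++ ([] : List String) ++ "O" :: d).getD (k + ([] : List String).length - 1) "" = "O" := by
          simp only [List.length_nil, List.append_nil, Nat.add_zero]
          rw [List.getD_eq_getElem?_getD, List.getElem?_append_left (by simp; omega),
              List.getElem?_replicate, if_pos (by omega)]
          rfl
        rw [hget]
        simp [List.replicate_succ', List.append_assoc]
  | append_singleton ms m ih =>
      have hm : m ≠ "O" := hmid m (by simp)
      have hms : ∀ x ∈ ms, x ≠ "O" := fun x hx => hmid x (by simp [hx])
      rw [slideA]
      have h1 : 1 ≤ k + (ms ++ [m]).length := by simp only [List.length_append, List.length_cons, List.length_nil]; omega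
      rw [if_pos h1]
      have hi1 : k + (ms ++ [m]).length - 1 = k + ms.length := by simp
      have hget : (List.replicate k "O" ++ (ms ++ [m]) ++ "O" :: d).getD (k + (ms ++ [m]).length - 1) "" = m := by
        rw [hi1, List.getD_eq_getElem?_getD,
            List.getElem?_append_left (by simp),
            List.getElem?_append_right (by simp),
            List.length_replicate, Nat.add_sub_cancel_left,
            List.getElem?_concat_length]
        rfl
      rw [hget, if_neg hm, hi1]
      have hset : ((List.replicate k "O" ++ (ms ++ [m]) ++ "O" :: d).set (k + ms.length) "O").set (k + (ms ++ [m]).length) "."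
          = List.replicate k "O" ++ ms ++ "O" :: "." :: d := by
        have hsetL : (List.replicate k "O" ++ (ms ++ [m])).set (k + ms.length) "O"
            = List.replicate k "O" ++ (ms ++ ["O"]) := by
          rw [List.set_append_right _ _ (by simp),
              List.length_replicate, Nat.add_sub_cancel_left,
              List.set_append_right _ _ (by simp),
              Nat.sub_self, List.set_cons_zero]
        rw [List.set_append_left _ _ (by simp), hsetL,
            List.set_append_right _ _ (by simp)]
        have h2 : k + (ms ++ [m]).length - (List.replicate k "O" ++ (ms ++ ["O"])).length = 0 := by
          simp
        rw [h2, List.set_cons_zero]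
        simp [List.append_assoc]
      rw [hset, ih ("." :: d) hms]
      simp [List.replicate_succ', List.append_assoc]

theorem shape_getD (k cut : Nat) (p : List Char) (i : Nat)
    (hk : k ≤ cut) (hc : cut ≤ i) (hi : i < p.length) :
    (List.replicate k "O" ++ List.replicate (cut - k) "." ++ (p.drop cut).map (fun c => String.singleton c)).getD i ""
      = String.singleton p[i] := by
  rw [List.getD_eq_getElem?_getD,
      List.getElem?_append_right (by simp; omega)]
  simp only [List.length_append, List.length_replicate]
  have h2 : i - (k + (cut - k)) = i - cut := by omega
  rw [h2, List.getElem?_map, List.getElem?_drop]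
  have h3 : cut + (i - cut) = i := by omega
  rw [h3, List.getElem?_eq_getElem hi]
  rfl

theorem loopA_eq_foldB (p : List Char) (i k cut : Nat)
    (hk : k ≤ cut) (hc : cut ≤ i) (hi : i ≤ p.length)
    (hside : ∀ c ∈ (p.drop cut).take (i - cut), c ≠ 'O') :
    loopA (List.replicate k "O" ++ List.replicate (cut - k) "." ++ (p.drop cut).map (fun c => String.singleton c))
        i p.length
      = (let st := foldB (p.drop i) (i, k, cut)
         List.replicate st.2.1 "O" ++ List.replicate (st.2.2 - st.2.1) "." ++ (p.drop st.2.2).map (fun c => String.singleton c)) := by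
  induction hm : p.length - i generalizing i k cut with
  | zero =>
      have hieq : i = p.length := by omega
      subst hieq
      rw [loopA]
      simp [foldB, List.drop_length]
  | succ m ih =>
      have hilt : i < p.length := by omega
      rw [loopA, dif_pos hilt]
      have hdrop : p.drop i = p[i] :: p.drop (i + 1) := List.drop_eq_getElem_cons hilt
      have hget := shape_getD k cut p i hk hc hilt
      by_cases hO : p[i] = 'O'
      · rw [hget, if_pos (by rw [sing_eq_O_iff]; exact hO)]
        have hmideq : (p.drop cut).map (fun c => String.singleton c)
            = ((p.drop cut).take (i - cut)).map (fun c => String.singleton c)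
              ++ "O" :: (p.drop (i + 1)).map (fun c => String.singleton c) := by
          conv_lhs => rw [← List.take_append_drop (i - cut) (p.drop cut)]
          rw [List.drop_drop]
          have h4 : cut + (i - cut) = i := by omega
          rw [h4, hdrop, hO]
          simp [String.singleton]
        set mid : List String :=
          List.replicate (cut - k) "." ++ ((p.drop cut).take (i - cut)).map (fun c => String.singleton c) with hmiddef
        have hmidlen : mid.length = i - k := by
          simp [hmiddef, List.length_take]
          omega
        have hmidne : ∀ x ∈ mid, x ≠ "O" := by
          intro x hx
          simp only [hmiddef, List.mem_append, List.mem_replicate, List.mem_map] at hx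
          rcases hx with ⟨-, rfl⟩ | ⟨c, hc', rfl⟩
          · decide
          · rw [Ne, sing_eq_O_iff]; exact hside c hc'
        have hshape : List.replicate k "O" ++ List.replicate (cut - k) "." ++ (p.drop cut).map (fun c => String.singleton c)
            = List.replicate k "O" ++ mid ++ "O" :: (p.drop (i + 1)).map (fun c => String.singleton c) := by
          rw [hmideq, hmiddef]; simp [List.append_assoc]
        have hs := slideA_eq mid k ((p.drop (i + 1)).map (fun c => String.singleton c)) hmidne
        rw [show k + mid.length = i by omega] at hs
        rw [hmidlen] at hs
        rw [hshape, hs]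
        have hrw : List.replicate (i - k) ("." : String) = List.replicate ((i + 1) - (k + 1)) ("." : String) := by
          rw [Nat.succ_sub_succ]
        rw [hrw]
        rw [ih (i + 1) (k + 1) (i + 1) (by omega) (by omega) (by omega)
            (by intro c hcmem; simp at hcmem) (by omega)]
        rw [hdrop]
        simp only [foldB, List.foldl_cons]
        simp [hO]
      · rw [hget, if_neg (fun hh => hO ((sing_eq_O_iff _).1 hh))]
        have hside' : ∀ c ∈ (p.drop cut).take (i + 1 - cut), c ≠ 'O' := by
          intro c hcmem
          have h5 : i + 1 - cut = (i - cut) + 1 := by omega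
          rw [h5, List.take_add_one] at hcmem
          rcases List.mem_append.1 hcmem with h | h
          · exact hside c h
          · have h6 : (p.drop cut)[i - cut]? = some p[i] := by
              rw [List.getElem?_drop]
              have h7 : cut + (i - cut) = i := by omega
              rw [h7, List.getElem?_eq_getElem hilt]
            rw [h6] at h
            simp at h
            rw [h]; exact hO
        rw [ih (i + 1) k cut hk (by omega) (by omega) hside' (by omega)]
        rw [hdrop]
        simp only [foldB, List.foldl_cons]
        simp [hO]

-- per segment: A's in-place sliding equals B's closed form
theorem part_eq (p : List Char) :
    loopA (p.map (fun c => String.singleton c)) 0 p.length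
      = (partB p).map (fun c => String.singleton c) := by
  have h := loopA_eq_foldB p 0 0 0 (le_refl 0) (le_refl 0) (Nat.zero_le _)
      (by intro c hcmem; simp at hcmem)
  simp only [List.replicate_zero, Nat.sub_zero, List.drop_zero, List.nil_append] at h
  rw [h]
  have e1 : String.singleton 'O' = "O" := rfl
  have e2 : String.singleton '.' = "." := rfl
  simp [partB, List.map_append, List.map_replicate, e1, e2]

-- A's foldl-with-accumulator, flattened
theorem foldA_eq (parts : List (List Char)) (acc : List String) :
    parts.foldl (fun acc part =>
        (acc ++ loopA (part.map (fun c => String.singleton c)) 0 part.length) ++ ["#"]) acc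
      = acc ++ parts.flatMap (fun part => loopA (part.map (fun c => String.singleton c)) 0 part.length ++ ["#"]) := by
  induction parts generalizing acc with
  | nil => simp
  | cons q qs ih => simp [List.foldl_cons, List.append_assoc, List.flatMap_def]

-- the '#'-joined B segments, with one trailing "#", equal A's flattened segments
theorem flat_eq_join (parts : List (List Char)) (hne : parts ≠ []) :
    parts.flatMap (fun part => loopA (part.map (fun c => String.singleton c)) 0 part.length ++ ["#"])
      = (PySem.Chars.join ['#'] (parts.map partB)).map (fun c => String.singleton c) ++ ["#"] := by
  induction parts with
  | nil => exact absurd rfl hne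
  | cons q qs ih =>
      cases qs with
      | nil => simp [PySem.Chars.join_singleton, part_eq]
      | cons q' qs' =>
          rw [List.flatMap_cons, ih (by simp)]
          simp only [List.map_cons, PySem.Chars.join_cons_cons]
          rw [part_eq]
          simp [String.singleton, List.append_assoc]

theorem fall_rocks_eq (line : String) : fall_rocks line = fall_rocks_alt line := by
  simp only [fall_rocks, fall_rocks_alt]
  rw [foldA_eq, List.nil_append]
  cases hsp : PySem.Chars.splitOn line.toList ['#'] with
  | nil => simp [PySem.Chars.join_nil]
  | cons q qs =>
      rw [flat_eq_join (q :: qs) (by simp), List.dropLast_concat]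

-- ===== VERDICT (by name: the statement is the Claim_ definition above) =====
theorem fall_rocks_spec : Claim_equal_fall_rocks := by
  intro line _
  unfold Spec_fall_rocks
  exact fall_rocks_eq line
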